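-- pv_equiv track=rewrite | github.com/VeriXAI/Into-the-Unknown | utils/Helpers.py | get_markers
-- ===== SOURCE A (Python) =====
-- from copy import copy
--
-- def get_markers(n_classes):
--     all_markers = ["o", "s", "^", "p", "X", "D", "v", "P", "<", ">", "H"]
--     if n_classes > len(all_markers):
--         markers = copy(all_markers)
--         while n_classes > len(markers):
--             markers.extend(markers)
--     else:
--         markers = all_markers
--     return markers[:n_classes]
-- ===== SOURCE B (Python) =====
-- def get_markers(n_classes):
--     all_markers = ["o", "s", "^", "p", "X", "D", "v", "P", "<", ">", "H"]
--     m = len(all_markers)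
--     if n_classes > m:
--         return [all_markers[i % m] for i in range(n_classes)]
--     return all_markers[:n_classes]
-- ===== Notes on version B (the rewrite author's own statement) =====
-- stated objective: simpler
-- what changed: Replaces the doubling while-loop (extend the list with itself until it is long enough, then slice) with direct modulo-indexed cycling, computing each output position as all_markers[i % 11] over range(n_classes).
import Mathlib
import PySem

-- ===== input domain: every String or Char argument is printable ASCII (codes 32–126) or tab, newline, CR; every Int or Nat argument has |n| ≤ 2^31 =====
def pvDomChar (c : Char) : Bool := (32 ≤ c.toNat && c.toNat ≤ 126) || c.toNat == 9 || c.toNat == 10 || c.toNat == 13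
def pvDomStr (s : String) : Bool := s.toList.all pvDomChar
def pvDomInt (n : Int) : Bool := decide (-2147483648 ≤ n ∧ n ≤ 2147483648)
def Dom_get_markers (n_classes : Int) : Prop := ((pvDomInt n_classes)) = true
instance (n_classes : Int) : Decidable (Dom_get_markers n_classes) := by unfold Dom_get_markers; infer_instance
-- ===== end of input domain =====

-- B replaces A's doubling while-loop with direct modulo-indexed cycling (simpler construction, same result).


-- ===== PORT A =====
def pvAllMarkers : List String := ["o", "s", "^", "p", "X", "D", "v", "P", "<", ">", "H"]

-- the while-loop: while n_classes > len(markers): markers.extend(markers)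
def pvLoopA (n : Int) (ms : List String) (h : ms ≠ []) : List String :=
  if n > (ms.length : Int) then
    pvLoopA n (ms ++ ms) (by simp [h])
  else ms
termination_by (n - ms.length).toNat
decreasing_by
  have : 0 < ms.length := List.length_pos_iff.mpr h
  simp only [List.length_append]
  omega

def get_markers (n_classes : Int) : List String :=
  let all_markers := pvAllMarkers
  let markers :=
    if n_classes > (all_markers.length : Int) then
      pvLoopA n_classes all_markers (by decide)
    else all_markers
  PySem.List.slice markers none (some n_classes)

-- ===== PORT B =====
def get_markers_alt (n_classes : Int) : List String :=
  let all_markers := pvAllMarkers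
  let m : Int := all_markers.length
  if n_classes > m then
    (PySem.List.pyRange 0 n_classes 1).map
      (fun i => PySem.List.pyGetD all_markers (PySem.Int.mod i m) "")
  else
    PySem.List.slice all_markers none (some n_classes)

-- ===== PRECONDITION & SPEC =====
def Spec_get_markers (n_classes : Int) (out : List String) : Prop := out = get_markers_alt n_classes
instance (n_classes : Int) (out : List String) : Decidable (Spec_get_markers n_classes out) := by unfold Spec_get_markers; infer_instance

-- ===== CLAIM (what is proved, stated in full; the proofs are below) =====
def Claim_equal_get_markers : Prop := ∀ (n_classes : Int), Dom_get_markers n_classes → Spec_get_markers n_classes (get_markers n_classes)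

-- ===== LEMMAS AND PROOFS =====

-- element of a c-fold repetition of xs
lemma getElem_flatten_replicate {α : Type} (xs : List α) :
    ∀ (c i : Nat) (hi : i < ((List.replicate c xs).flatten).length)
      (hm : i % xs.length < xs.length),
      ((List.replicate c xs).flatten)[i] = xs[i % xs.length] := by
  intro c
  induction c with
  | zero => intro i hi hm; simp at hi
  | succ c ih =>
    intro i hi hm
    have hxs : 0 < xs.length := by
      rcases Nat.eq_zero_or_pos xs.length with h0 | h0
      · omega
      · exact h0
    simp only [List.replicate_succ, List.flatten_cons]
    by_cases hlt : i < xs.length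
    · rw [List.getElem_append_left hlt]
      congr 1
      exact (Nat.mod_eq_of_lt hlt).symm
    · have hge : xs.length ≤ i := Nat.le_of_not_lt hlt
      rw [List.getElem_append_right hge]
      have hlen : ((List.replicate c xs).flatten).length = c * xs.length := by
        simp [List.length_flatten, List.map_replicate]
      have hi' : i - xs.length < ((List.replicate c xs).flatten).length := by
        simp only [List.replicate_succ, List.flatten_cons, List.length_append] at hi
        omega
      have hmod : (i - xs.length) % xs.length = i % xs.length := by
        conv_rhs => rw [← Nat.sub_add_cancel hge]
        rw [Nat.add_mod_right]
      rw [ih (i - xs.length) hi' (by rw [hmod]; exact hm)]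
      simp only [hmod]

-- the loop keeps the state a repetition of pvAllMarkers and stops long enough
lemma pvLoopA_spec (n : Int) (ms : List String) (h : ms ≠ []) :
    ∀ (c : Nat), 1 ≤ c → ms = (List.replicate c pvAllMarkers).flatten →
      ∃ c', 1 ≤ c' ∧ pvLoopA n ms h = (List.replicate c' pvAllMarkers).flatten ∧
        n ≤ 11 * c' := by
  induction ms, h using pvLoopA.induct n with
  | case1 ms h hgt ih =>
    intro c hc hms
    rcases ih (c + c) (by omega) (by rw [hms, ← List.flatten_append, ← List.replicate_add]) with
      ⟨c', hc', heq, hle⟩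
    refine ⟨c', hc', ?_, hle⟩
    rw [pvLoopA, if_pos hgt]
    exact heq
  | case2 ms h hle =>
    intro c hc hms
    refine ⟨c, hc, ?_, ?_⟩
    · rw [pvLoopA, if_neg hle]; exact hms
    · have : ms.length = c * 11 := by
        rw [hms]; simp [List.length_flatten, List.map_replicate, pvAllMarkers]
      omega

-- take from a repetition equals modulo-indexed cycling
lemma take_flatten_replicate_eq_map (c k : Nat) (hk : k ≤ 11 * c) :
    ((List.replicate c pvAllMarkers).flatten).take k =
      ((PySem.List.pyRange 0 (k : Int) 1).map
        (fun i => PySem.List.pyGetD pvAllMarkers (PySem.Int.mod i 11) "")) := by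
  have hlen : ((List.replicate c pvAllMarkers).flatten).length = c * 11 := by
    simp [List.length_flatten, List.map_replicate, pvAllMarkers]
  rw [PySem.List.pyRange_one]
  simp only [sub_zero, Int.toNat_natCast]
  apply List.ext_getElem
  · simp [hlen]; omega
  · intro i h1 h2
    have hik : i < k := by
      simp only [List.length_take, hlen] at h1; omega
    simp only [List.getElem_take, List.getElem_map, List.getElem_range]
    have hm : i % 11 < 11 := Nat.mod_lt _ (by omega)
    have hmod : PySem.Int.mod ((0 : Int) + (i : Int)) 11 = ((i % 11 : Nat) : Int) := by
      rw [zero_add]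
      exact_mod_cast PySem.Int.mod_natCast i 11
    rw [hmod, PySem.List.pyGetD_natCast]
    rw [getElem_flatten_replicate pvAllMarkers c i (by omega)
        (by simpa [pvAllMarkers] using hm)]
    have hm' : (i % 11) < (pvAllMarkers).length := by simpa [pvAllMarkers] using hm
    rw [List.getD_eq_getElem _ _ hm']
    simp only [show pvAllMarkers.length = 11 from rfl]

-- ===== VERDICT (by name: the statement is the Claim_ definition above) =====
theorem get_markers_spec : Claim_equal_get_markers := by
  intro n _
  unfold Spec_get_markers get_markers get_markers_alt
  by_cases hgt : n > ((pvAllMarkers).length : Int)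
  · simp only [hgt, if_pos]
    have h11 : ((pvAllMarkers).length : Int) = 11 := by decide
    rcases pvLoopA_spec n pvAllMarkers (by decide) 1 (by omega) (by simp) with
      ⟨c', hc', heq, hle⟩
    rw [heq]
    have hn0 : 0 ≤ n := by omega
    rw [PySem.List.slice_to _ hn0]
    have hk : n.toNat ≤ 11 * c' := by omega
    have := take_flatten_replicate_eq_map c' n.toNat hk
    rw [this]
    congr 1
    · rw [Int.toNat_of_nonneg hn0]
  · simp only [hgt, ite_false]
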